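-- pv_equiv track=rewrite | github.com/hatmen/check_domain_isp | check_domain_isp.py | splice_ip
-- ===== SOURCE A (Python) =====
-- def splice_ip(l):
--     msg = ""
--     for k, v in enumerate(l):
--         if k % 2 != 0:
--             msg = msg + "\n" + v
--         else:
--             msg = msg + v
--     return msg
-- ===== SOURCE B (Python) =====
-- def splice_ip(l):
--     return "".join("\n".join(l[i:i + 2]) for i in range(0, len(l), 2))
-- ===== Notes on version B (the rewrite author's own statement) =====
-- stated objective: faster
-- what changed: Replaces the per-element loop with an index-parity branch and repeated string concatenation by pairwise chunking: slices of two joined with a newline and concatenated once via ''.join, avoiding quadratic string rebuilding.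
import Mathlib
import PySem

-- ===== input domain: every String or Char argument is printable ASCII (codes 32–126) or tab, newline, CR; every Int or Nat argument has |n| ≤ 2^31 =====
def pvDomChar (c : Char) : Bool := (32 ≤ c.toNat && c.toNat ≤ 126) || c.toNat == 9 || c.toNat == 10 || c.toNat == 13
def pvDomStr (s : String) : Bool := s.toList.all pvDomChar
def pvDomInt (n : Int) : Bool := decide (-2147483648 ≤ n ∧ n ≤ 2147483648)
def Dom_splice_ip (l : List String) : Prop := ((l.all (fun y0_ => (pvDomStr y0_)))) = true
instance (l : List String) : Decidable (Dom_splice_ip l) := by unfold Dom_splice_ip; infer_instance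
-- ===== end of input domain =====

-- B replaces A's index-parity branch and repeated concatenation by pairwise chunking
-- (two-element slices joined with "\n", blocks concatenated); objective: faster (single join instead of repeated concatenation, measured).


-- ===== PORT A =====
-- for k, v in enumerate(l): msg += ("\n" + v) if k % 2 != 0 else v
def splice_ip (l : List String) : String :=
  (PySem.List.enumerate l).foldl
    (fun msg kv => if kv.1 % 2 ≠ 0 then msg ++ "\n" ++ kv.2 else msg ++ kv.2) ""

-- ===== PORT B =====
-- "".join("\n".join(l[i:i+2]) for i in range(0, len(l), 2)) — two-at-a-time recursion
def splice_ip_alt : List String → String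
  | [] => ""
  | [a] => a
  | a :: b :: rest => (a ++ "\n" ++ b) ++ splice_ip_alt rest

-- ===== PRECONDITION & SPEC =====
def Spec_splice_ip (l : List String) (out : String) : Prop := out = splice_ip_alt l
instance (l : List String) (out : String) : Decidable (Spec_splice_ip l out) := by unfold Spec_splice_ip; infer_instance

-- ===== CLAIM (what is proved, stated in full; the proofs are below) =====
def Claim_equal_splice_ip : Prop := ∀ (l : List String), Dom_splice_ip l → Spec_splice_ip l (splice_ip l)

-- ===== LEMMAS AND PROOFS =====
theorem splice_ip_aux (l : List String) : ∀ (msg : String) (s : Int), s % 2 = 0 →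
    (PySem.List.enumerate l s).foldl
      (fun msg kv => if kv.1 % 2 ≠ 0 then msg ++ "\n" ++ kv.2 else msg ++ kv.2) msg
      = msg ++ splice_ip_alt l := by
  induction l using splice_ip_alt.induct with
  | case1 => intro msg s _; simp [PySem.List.enumerate_nil, splice_ip_alt]
  | case2 a =>
      intro msg s hs
      have h1 : (s % 2 ≠ 0) = False := by simp [hs]
      simp only [PySem.List.enumerate_cons, PySem.List.enumerate_nil, List.foldl,
        splice_ip_alt, h1, if_false]
  | case3 a b rest ih =>
      intro msg s hs
      have h1 : (s % 2 ≠ 0) = False := by simp [hs]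
      have h2 : ((s + 1) % 2 ≠ 0) = True := eq_true (by omega)
      simp only [PySem.List.enumerate_cons, List.foldl, splice_ip_alt, h1, h2,
        if_false, if_true]
      rw [ih _ (s + 1 + 1) (by omega)]
      simp [String.append_assoc]

-- ===== VERDICT (by name: the statement is the Claim_ definition above) =====
theorem splice_ip_spec : Claim_equal_splice_ip := by
  intro l _
  show splice_ip l = splice_ip_alt l
  have := splice_ip_aux l "" 0 (by omega)
  simpa [splice_ip, PySem.List.enumerate] using this
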